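-- pv_equiv track=rewrite | github.com/rashid-mamadolimov/Collection | anz.py | anz
-- ===== SOURCE A (Python) =====
-- def anz(data,x):
--     if len(data) == 1:
--         res = data.copy()
--     else:
--
--         res_1 = [data[0]]
--         res = res_1.copy()
--         res_2 = [data[0]]
--         for i in range(len(data) - 1):
--             if abs(data[i]-data[i+1]) <= x:
--                 res_2.append(data[i+1])
--                 res = res_2.copy()
--             else:
--                 if len(res_2) > len(res_1):
--                     res = res_2.copy()
--                 res_1 = res_2.copy()
--                 res_2.clear()
--                 res_2.append(data[i+1])
--
--     return res
-- ===== SOURCE B (Python) =====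
-- def anz(data, x):
--     best_s, best_e = 0, 1
--     start = 0
--     for i in range(1, len(data)):
--         if abs(data[i - 1] - data[i]) <= x:
--             best_s, best_e = start, i + 1
--         else:
--             start = i
--     return data[best_s:best_e]
-- ===== Notes on version B (the rewrite author's own statement) =====
-- stated objective: faster
-- what changed: B replaces A's three repeatedly-copied run lists with a single pass that tracks the current run's start index and the slice bounds of the last run of length >= 2 (which is what A's tie-breaking actually returns), slicing the input once at the end.
import Mathlib
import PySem

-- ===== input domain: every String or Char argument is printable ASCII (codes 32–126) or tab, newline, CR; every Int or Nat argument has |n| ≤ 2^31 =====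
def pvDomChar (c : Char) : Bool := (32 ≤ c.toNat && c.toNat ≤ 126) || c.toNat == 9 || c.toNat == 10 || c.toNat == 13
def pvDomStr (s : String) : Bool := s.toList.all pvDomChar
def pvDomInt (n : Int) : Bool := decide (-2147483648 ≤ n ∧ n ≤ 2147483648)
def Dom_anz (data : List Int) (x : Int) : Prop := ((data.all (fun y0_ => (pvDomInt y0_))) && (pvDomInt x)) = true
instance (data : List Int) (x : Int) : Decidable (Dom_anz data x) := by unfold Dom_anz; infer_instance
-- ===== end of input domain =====

-- B is a single O(n) pass tracking start/end indices of the relevant run instead of A's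
-- repeated list copying (O(n^2)); A and B agree on every nonempty list.

-- ===== PORT A =====
-- loop body of A's for-loop; state = (res_1, res, res_2)
def anzStep (data : List Int) (x : Int) (st : List Int × List Int × List Int) (i : Int) :
    List Int × List Int × List Int :=
  if |PySem.List.pyGetD data i 0 - PySem.List.pyGetD data (i + 1) 0| ≤ x then
    (st.1, st.2.2 ++ [PySem.List.pyGetD data (i + 1) 0], st.2.2 ++ [PySem.List.pyGetD data (i + 1) 0])
  else
    (st.2.2, if st.2.2.length > st.1.length then st.2.2 else st.2.1,
     [PySem.List.pyGetD data (i + 1) 0])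

def anz (data : List Int) (x : Int) : List Int :=
  if data.length = 1 then data
  else
    ((PySem.List.pyRange 0 ((data.length : Int) - 1) 1).foldl (anzStep data x)
      ([PySem.List.pyGetD data 0 0], [PySem.List.pyGetD data 0 0], [PySem.List.pyGetD data 0 0])).2.1

-- ===== PORT B =====
-- loop body of B's for-loop; state = ((best_s, best_e), start)
def anzAltStep (data : List Int) (x : Int) (st : (Int × Int) × Int) (i : Int) :
    (Int × Int) × Int :=
  if |PySem.List.pyGetD data (i - 1) 0 - PySem.List.pyGetD data i 0| ≤ x then
    ((st.2, i + 1), st.2)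
  else
    (st.1, i)

def anz_alt (data : List Int) (x : Int) : List Int :=
  let st := (PySem.List.pyRange 1 (data.length : Int) 1).foldl (anzAltStep data x) ((0, 1), 0)
  PySem.List.slice data (some st.1.1) (some st.1.2)

-- ===== PRECONDITION & SPEC =====
-- Pre_ excludes only the empty list, on which A raises IndexError (data[0]).
def Pre_anz (data : List Int) (x : Int) : Prop := data ≠ []
instance (data : List Int) (x : Int) : Decidable (Pre_anz data x) := by unfold Pre_anz; infer_instance
def pvWitness_anz : List Int × Int := ([1, 2, 10, 11, 12, 30], 1)

def Spec_anz (data : List Int) (x : Int) (out : List Int) : Prop := out = anz_alt data x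
instance (data : List Int) (x : Int) (out : List Int) : Decidable (Spec_anz data x out) := by unfold Spec_anz; infer_instance

-- ===== CLAIM (what is proved, stated in full; the proofs are below) =====
def Claim_equal_anz : Prop := ∀ (data : List Int) (x : Int), Dom_anz data x → Pre_anz data x → Spec_anz data x (anz data x)

-- ===== LEMMAS AND PROOFS =====
-- state of A's loop after j iterations
def stateA (data : List Int) (x : Int) (j : Nat) : List Int × List Int × List Int :=
  (PySem.List.pyRange 0 (j : Int) 1).foldl (anzStep data x)
    ([PySem.List.pyGetD data 0 0], [PySem.List.pyGetD data 0 0], [PySem.List.pyGetD data 0 0])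

-- state of B's loop after j iterations (i.e. after index i = j)
def stateB (data : List Int) (x : Int) (j : Nat) : (Int × Int) × Int :=
  (PySem.List.pyRange 1 ((j : Int) + 1) 1).foldl (anzAltStep data x) ((0, 1), 0)

lemma stateA_succ (data : List Int) (x : Int) (j : Nat) :
    stateA data x (j + 1) = anzStep data x (stateA data x j) (j : Int) := by
  unfold stateA
  rw [show ((j + 1 : Nat) : Int) = (j : Int) + 1 by push_cast; ring,
    PySem.List.pyRange_one_succ_right (by positivity), List.foldl_append]
  rfl

lemma stateB_succ (data : List Int) (x : Int) (j : Nat) :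
    stateB data x (j + 1) = anzAltStep data x (stateB data x j) ((j : Int) + 1) := by
  unfold stateB
  rw [show ((j + 1 : Nat) : Int) + 1 = ((j : Int) + 1) + 1 by push_cast; ring,
    PySem.List.pyRange_one_succ_right (by omega), List.foldl_append]
  rfl

lemma anz_inv (data : List Int) (x : Int) (j : Nat) (hd : data ≠ []) (hj : j + 1 ≤ data.length) :
    ∃ s a b : Nat,
      stateB data x j = (((a : Int), (b : Int)), (s : Int)) ∧
      s ≤ j ∧ a < b ∧ b ≤ j + 1 ∧
      (stateA data x j).1 ≠ [] ∧
      (stateA data x j).2.2 = (data.drop s).take (j + 1 - s) ∧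
      (stateA data x j).2.1 = (data.drop a).take (b - a) ∧
      (s < j → a = s ∧ b = j + 1) := by
  induction j with
  | zero =>
    refine ⟨0, 0, 1, ?_, ?_⟩
    · unfold stateB
      rw [PySem.List.pyRange_one_eq_nil (by omega)]
      rfl
    · unfold stateA
      rw [PySem.List.pyRange_one_eq_nil (by omega)]
      obtain ⟨h, t, rfl⟩ := List.exists_cons_of_ne_nil hd
      simp [PySem.List.pyGetD_zero_cons]
  | succ j ih =>
    obtain ⟨s, a, b, hB, hs, hab, hb, h1, h2, hres, htail⟩ := ih (by omega)
    have hjlt : j + 1 < data.length := by omega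
    have hgj : PySem.List.pyGetD data ((j : Int)) 0 = data.getD j 0 :=
      PySem.List.pyGetD_natCast data j 0
    have hgj1 : PySem.List.pyGetD data ((j : Int) + 1) 0 = data.getD (j + 1) 0 := by
      rw [show (j : Int) + 1 = ((j + 1 : Nat) : Int) by push_cast; ring,
        PySem.List.pyGetD_natCast]
    have hget : data.getD (j + 1) 0 = data[j + 1]'hjlt := List.getD_eq_getElem data 0 hjlt
    rw [stateA_succ, stateB_succ, anzStep, anzAltStep, hB]
    simp only [show (j : Int) + 1 - 1 = (j : Int) by ring, hgj, hgj1]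
    by_cases hc : |data.getD j 0 - data.getD (j + 1) 0| ≤ x
    · -- the run extends: both sides adopt data[start : j+2]
      have hext : (data.drop s).take (j + 1 - s) ++ [data.getD (j + 1) 0]
          = (data.drop s).take (j + 2 - s) := by
        rw [show j + 2 - s = (j + 1 - s) + 1 by omega, List.take_add_one]
        have hD : (data.drop s)[j + 1 - s]? = some (data[j + 1]'hjlt) := by
          rw [List.getElem?_drop, List.getElem?_eq_getElem (by omega)]
          congr 1
          congr 1
          omega
        rw [hD, hget]
        rfl
      refine ⟨s, s, j + 2, ?_, by omega, by omega, by omega, ?_, ?_, ?_, ?_⟩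
      · simp only [if_pos hc]
        rw [show ((j : Int) + 1) + 1 = ((j + 2 : Nat) : Int) by push_cast; ring]
      · simpa only [if_pos hc] using h1
      · simp only [if_pos hc]
        rw [h2, show j + 1 + 1 - s = j + 2 - s by omega]
        exact hext
      · simp only [if_pos hc]
        rw [h2, show j + 2 - s = j + 2 - s by omega]
        exact hext
      · intro _
        exact ⟨rfl, by omega⟩
    · -- the run breaks: A keeps res (no real update), B keeps best and restarts at j+1
      have hres2len : (stateA data x j).2.2.length = j + 1 - s := by
        rw [h2]
        simp only [List.length_take, List.length_drop]
        omega
      have hresq : (if (stateA data x j).2.2.length > (stateA data x j).1.length then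
          (stateA data x j).2.2 else (stateA data x j).2.1) = (stateA data x j).2.1 := by
        split_ifs with hlen
        · have h1len : 1 ≤ (stateA data x j).1.length :=
            List.length_pos_iff.mpr h1
          have hsj : s < j := by omega
          obtain ⟨ha, hb'⟩ := htail hsj
          rw [h2, hres, ha, hb']
        · rfl
      refine ⟨j + 1, a, b, ?_, by omega, hab, by omega, ?_, ?_, ?_,
        by intro h; exact absurd h (lt_irrefl _)⟩
      · simp only [if_neg hc]
        rw [show (j : Int) + 1 = ((j + 1 : Nat) : Int) by push_cast; ring]
      · simp only [if_neg hc]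
        rw [h2]
        have hlen : ((data.drop s).take (j + 1 - s)).length = j + 1 - s := by
          simp only [List.length_take, List.length_drop]
          omega
        intro hcon
        rw [hcon] at hlen
        simp only [List.length_nil] at hlen
        omega
      · simp only [if_neg hc]
        rw [hget, show j + 1 + 1 - (j + 1) = 1 by omega,
          List.take_one, List.head?_drop, List.getElem?_eq_getElem hjlt]
        rfl
      · simp only [if_neg hc]
        rw [hresq, hres]

lemma anz_alt_singleton (d : Int) (x : Int) : anz_alt [d] x = [d] := by
  unfold anz_alt
  rw [show (([d] : List Int).length : Int) = 1 by simp,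
    PySem.List.pyRange_one_eq_nil (by omega)]
  simp [pysem]

lemma slice_nat (data : List Int) (a b : Nat) :
    PySem.List.slice data (some (a : Int)) (some (b : Int)) = (data.drop a).take (b - a) :=
  PySem.List.slice_natCast data a b

-- ===== VERDICT (by name: the statement is the Claim_ definition above) =====
theorem anz_spec : Claim_equal_anz := by
  intro data x _ hpre
  unfold Spec_anz
  by_cases h1 : data.length = 1
  · obtain ⟨d, rfl⟩ : ∃ d, data = [d] := by
      match data, h1 with
      | [d], _ => exact ⟨d, rfl⟩
    rw [anz_alt_singleton]
    unfold anz
    rw [if_pos h1]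
  · unfold anz anz_alt
    rw [if_neg h1]
    have hn : 2 ≤ data.length := by
      rcases data with _ | ⟨h, t⟩
      · exact absurd rfl hpre
      · rcases t with _ | _
        · simp at h1
        · simp
    obtain ⟨s, a, b, hB, _, hab, hble, _, _, hres, _⟩ :=
      anz_inv data x (data.length - 1) hpre (by omega)
    have hA : ((PySem.List.pyRange 0 ((data.length : Int) - 1) 1).foldl (anzStep data x)
        ([PySem.List.pyGetD data 0 0], [PySem.List.pyGetD data 0 0], [PySem.List.pyGetD data 0 0])).2.1
        = (stateA data x (data.length - 1)).2.1 := by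
      unfold stateA
      congr 2
      push_cast [Nat.cast_sub (by omega : 1 ≤ data.length)]
      try ring
    have hBB : (PySem.List.pyRange 1 (data.length : Int) 1).foldl (anzAltStep data x) ((0, 1), 0)
        = stateB data x (data.length - 1) := by
      unfold stateB
      congr 2
      push_cast [Nat.cast_sub (by omega : 1 ≤ data.length)]
      try ring
    rw [hA, hres, hBB, hB]
    rw [slice_nat]
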